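-- pv_equiv track=rewrite | github.com/jdtully/coursera-python | users_groups.py | groups_per_user
-- ===== SOURCE A (Python) =====
-- def groups_per_user(group_dictionary):
--     user_groups = {}
--     for groups, users in group_dictionary.items():
--         for user in users:
--             if user not in user_groups:
--
--                 user_groups[user] = [groups]
--
--             else:
--
--                 user_groups[user].append(groups)
--
--     return(user_groups)
-- ===== SOURCE B (Python) =====
-- def groups_per_user(group_dictionary):
--     # Pass 1: users in first-encountered order.
--     users = []
--     for _, members in group_dictionary.items():
--         for u in members:
--             if u not in users:
--                 users.append(u)
--     # Pass 2: for each user, gather every occurrence of it across all groups.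
--     return {u: [g for g, members in group_dictionary.items() for x in members if x == u]
--             for u in users}
-- ===== Notes on version B (the rewrite author's own statement) =====
-- stated objective: alternative
-- what changed: Replaces the single index-building dict pass by two phases: first collect the users in first-encountered order, then for each user rescan all groups gathering every occurrence of that user.
import Mathlib
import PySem

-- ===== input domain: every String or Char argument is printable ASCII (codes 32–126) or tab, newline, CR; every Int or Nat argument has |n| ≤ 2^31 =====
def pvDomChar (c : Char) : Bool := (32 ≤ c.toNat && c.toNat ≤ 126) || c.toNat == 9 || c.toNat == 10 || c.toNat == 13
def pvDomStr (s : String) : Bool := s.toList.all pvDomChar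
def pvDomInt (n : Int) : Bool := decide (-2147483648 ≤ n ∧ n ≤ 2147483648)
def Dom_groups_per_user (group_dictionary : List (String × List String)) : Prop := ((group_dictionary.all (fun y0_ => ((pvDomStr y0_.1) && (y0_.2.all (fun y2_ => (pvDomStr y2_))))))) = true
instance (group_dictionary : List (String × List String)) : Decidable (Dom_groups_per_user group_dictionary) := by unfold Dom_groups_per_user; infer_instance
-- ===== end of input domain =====

-- B collects the users in first-encountered order in one pass, then rescans all groups per user;
-- same return value as A (objective: alternative decomposition, no speed claim).

-- ===== PORT A =====
def groups_per_user (group_dictionary : List (String × List String)) : List (String × List String) :=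
  (group_dictionary.foldl
    (fun user_groups p =>
      p.2.foldl
        (fun user_groups user =>
          if user_groups.contains user = false then
            user_groups.insert user [p.1]
          else
            user_groups.modify user [] (fun l => l ++ [p.1]))
        user_groups)
    (PySem.Dict.empty : PySem.Dict String (List String))).items

-- ===== PORT B =====
def groups_per_user_alt (group_dictionary : List (String × List String)) : List (String × List String) :=
  (group_dictionary.foldl
    (fun users p => p.2.foldl (fun users u => PySem.Set.add users u) users)
    ([] : PySem.Set String)).map
    (fun u =>
      (u, group_dictionary.flatMap
            (fun p => p.2.filterMap (fun x => if x = u then some p.1 else none))))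

-- ===== PRECONDITION & SPEC =====
def Spec_groups_per_user (group_dictionary : List (String × List String)) (out : List (String × List String)) : Prop := out = groups_per_user_alt group_dictionary
instance (group_dictionary : List (String × List String)) (out : List (String × List String)) : Decidable (Spec_groups_per_user group_dictionary out) := by unfold Spec_groups_per_user; infer_instance

-- ===== CLAIM (what is proved, stated in full; the proofs are below) =====
def Claim_equal_groups_per_user : Prop := ∀ (group_dictionary : List (String × List String)), Dom_groups_per_user group_dictionary → Spec_groups_per_user group_dictionary (groups_per_user group_dictionary)

-- ===== LEMMAS AND PROOFS =====

-- (user, group) pairs, one per membership occurrence, in iteration order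
def pvPairs (gd : List (String × List String)) : List (String × String) :=
  gd.flatMap (fun p => p.2.map (fun u => (u, p.1)))

-- A's branching step is exactly a modify
theorem pvStep_eq (ug : PySem.Dict String (List String)) (u g : String) :
    (if ug.contains u = false then ug.insert u [g]
     else ug.modify u [] (fun l => l ++ [g]))
      = ug.modify u [] (fun l => l ++ [g]) := by
  by_cases h : ug.contains u = false
  · simp [h, PySem.Dict.modify, PySem.Dict.getD_of_not_contains ug [] h]
  · simp [h]

-- A's nested fold flattens to a modify fold over the membership pairs
theorem pvA_flatten (gd : List (String × List String)) (d : PySem.Dict String (List String)) :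
    gd.foldl
      (fun ug p =>
        p.2.foldl
          (fun ug user =>
            if ug.contains user = false then ug.insert user [p.1]
            else ug.modify user [] (fun l => l ++ [p.1])) ug) d
      = (pvPairs gd).foldl (fun ug q => ug.modify q.1 [] (fun l => l ++ [q.2])) d := by
  induction gd generalizing d with
  | nil => simp [pvPairs]
  | cons p gd ih =>
      simp only [List.foldl_cons, pvPairs, List.flatMap_cons, List.foldl_append, List.foldl_map]
      rw [← pvPairs, ih]
      congr 1
      simp only [pvStep_eq]

-- B's nested collection fold flattens the same way
theorem pvB_flatten (gd : List (String × List String)) (s : PySem.Set String) :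
    gd.foldl (fun users p => p.2.foldl (fun users u => PySem.Set.add users u) users) s
      = (pvPairs gd).foldl (fun users q => PySem.Set.add users q.1) s := by
  induction gd generalizing s with
  | nil => simp [pvPairs]
  | cons p gd ih =>
      simp only [List.foldl_cons, pvPairs, List.flatMap_cons, List.foldl_append, List.foldl_map]
      rw [← pvPairs, ih]

-- B's per-user comprehension is filter-then-project over the membership pairs
theorem pvVal_eq (gd : List (String × List String)) (u : String) :
    gd.flatMap (fun p => p.2.filterMap (fun x => if x = u then some p.1 else none))
      = ((pvPairs gd).filter (fun q => q.1 == u)).map (fun q => q.2) := by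
  induction gd with
  | nil => simp [pvPairs]
  | cons p gd ih =>
      simp only [pvPairs, List.flatMap_cons, List.filter_append, List.map_append] at *
      rw [ih]
      congr 1
      induction p.2 with
      | nil => simp
      | cons x xs ihx =>
          by_cases hx : x = u <;> simp [hx, ihx]

-- ===== VERDICT (by name: the statement is the Claim_ definition above) =====
theorem groups_per_user_spec : Claim_equal_groups_per_user := by
  intro gd _
  unfold Spec_groups_per_user groups_per_user groups_per_user_alt
  rw [pvA_flatten, pvB_flatten]
  have hnodup : ((pvPairs gd).foldl (fun ug q => ug.modify q.1 [] (fun l => l ++ [q.2]))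
      (PySem.Dict.empty : PySem.Dict String (List String))).keys.Nodup := by
    exact PySem.Dict.nodup_keys_foldl_modify_key (pvPairs gd) Prod.fst []
      (fun _ q => fun l => l ++ [q.2]) PySem.Dict.empty (by simp)
  rw [PySem.Dict.items_eq_map_keys _ hnodup []]
  rw [PySem.Dict.keys_foldl_modify_key]
  simp only [PySem.Dict.keys_empty]
  rw [← PySem.Set.update_map_eq_foldl_add]
  apply List.map_congr_left
  intro u _
  rw [PySem.Dict.getD_foldl_modify_append, PySem.Dict.getD_empty, pvVal_eq]
  simp
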